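-- pv_equiv track=rewrite | github.com/alexKotz-koz/CPBSPrelim_Day3 | src/components/deBruijnGraph.py | findOrphanedSubgraphs
-- ===== SOURCE A (Python) =====
-- def findOrphanedSubgraphs(nodes, edges):
--     visited = set()
--     orphanedSubgraphs = 0
--
--     for node in nodes:
--         if node not in visited:
--             # Start a DFS from this node
--             stack = [node]
--             connectedComponent = set()
--
--             while stack:
--                 currentNode = stack.pop()
--                 visited.add(currentNode)
--                 connectedComponent.add(currentNode)
--
--                 if currentNode in edges:
--                     for target in edges[currentNode]:
--                         if target not in visited:
--                             stack.append(target)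
--
--             # Check if this connected component is connected to any other components
--             if not any(node in edges for node in connectedComponent) and not any(
--                 node in targets
--                 for targets in edges.values()
--                 for node in connectedComponent
--             ):
--                 orphanedSubgraphs += 1
--
--     return orphanedSubgraphs
-- ===== SOURCE B (Python) =====
-- def findOrphanedSubgraphs(nodes, edges):
--     # A node group is orphaned iff it is a single isolated node: neither a source
--     # (key of edges) nor a target of any edge. Count distinct such nodes.
--     linked = set(edges)
--     for targets in edges.values():
--         linked.update(targets)
--     return len({n for n in nodes if n not in linked})
-- ===== Notes on version B (the rewrite author's own statement) =====
-- stated objective: faster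
-- what changed: B replaces the per-node DFS plus per-component scans over all edge keys/targets with a single precomputed 'linked' set (edge sources plus the union of all target lists) and counts the distinct nodes outside it.
import Mathlib
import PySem

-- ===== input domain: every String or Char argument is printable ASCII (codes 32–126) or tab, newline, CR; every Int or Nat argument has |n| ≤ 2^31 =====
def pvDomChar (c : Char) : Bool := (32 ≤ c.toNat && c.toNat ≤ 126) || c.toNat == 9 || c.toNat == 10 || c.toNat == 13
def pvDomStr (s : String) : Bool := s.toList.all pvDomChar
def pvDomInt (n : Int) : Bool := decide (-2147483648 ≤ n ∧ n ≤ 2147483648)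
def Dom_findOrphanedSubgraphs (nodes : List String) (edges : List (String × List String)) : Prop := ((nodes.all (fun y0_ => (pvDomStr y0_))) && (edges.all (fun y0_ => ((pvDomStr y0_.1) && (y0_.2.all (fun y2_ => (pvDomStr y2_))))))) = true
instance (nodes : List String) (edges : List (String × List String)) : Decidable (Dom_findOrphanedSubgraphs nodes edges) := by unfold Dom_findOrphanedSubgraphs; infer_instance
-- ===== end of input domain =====

-- B replaces A's per-node DFS plus per-component scans over all edge keys/targets with one
-- precomputed 'linked' set and a count of the distinct nodes outside it (objective: faster).

-- ===== PORT A =====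
-- union of all target lists of the edge dict (only used for the termination measure / proofs)
def pvAllTargets (d : PySem.Dict String (List String)) : List String := d.values.flatten

-- 'for target in edges[currentNode]: if target not in visited: stack.append(target)'
-- (the stack top is the list head, so each append conses)
def pvPush (visited : PySem.Set String) (st targets : List String) : List String :=
  targets.foldl (fun st t => if PySem.Set.contains visited t then st else t :: st) st

theorem pvPushFilterAux (q : String → Bool) (ts : List String) :
    ∀ st : List String,
      ((ts.foldl (fun st t => if q t then st else t :: st) st).filter q).length
        = (st.filter q).length := by
  induction ts with
  | nil => intro st; rfl
  | cons t ts ih =>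
    intro st
    by_cases h : q t = true
    · simp [List.foldl, h, ih]
    · simp only [List.foldl, Bool.not_eq_true] at *
      rw [show (if q t = true then st else t :: st) = t :: st from if_neg (by simp [h]), ih,
        List.filter_cons, h]
      simp

theorem pvPushMemAux (q : String → Bool) (ts : List String) :
    ∀ st x, x ∈ ts.foldl (fun st t => if q t then st else t :: st) st →
      x ∈ st ∨ x ∈ ts := by
  induction ts with
  | nil => intro st x hx; exact Or.inl hx
  | cons t ts ih =>
    intro st x hx
    rcases ih _ x hx with h | h
    · simp only at h
      by_cases hq : q t = true
      · rw [if_pos hq] at h; exact Or.inl h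
      · rw [if_neg hq] at h
        rcases List.mem_cons.1 h with h | h
        · exact Or.inr (by simp [h])
        · exact Or.inl h
    · exact Or.inr (List.mem_cons_of_mem _ h)

theorem pvPushFilter (visited : PySem.Set String) (st targets : List String) :
    ((pvPush visited st targets).filter (fun x => PySem.Set.contains visited x)).length
      = (st.filter (fun x => PySem.Set.contains visited x)).length :=
  pvPushFilterAux _ targets st

theorem pvPushMem (visited : PySem.Set String) (st targets : List String) (x : String)
    (hx : x ∈ pvPush visited st targets) : x ∈ st ∨ x ∈ targets :=
  pvPushMemAux _ targets st x hx

theorem pvTargetsSub (d : PySem.Dict String (List String)) (current : String)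
    (targets : List String) (hget : d.get? current = some targets) :
    ∀ x ∈ targets, x ∈ pvAllTargets d := by
  intro x hx
  have hmem : targets ∈ d.values := by
    have := PySem.Dict.mem_items_of_get?_eq_some d hget
    simp only [PySem.Dict.values]
    exact List.mem_map.2 ⟨_, this, rfl⟩
  exact List.mem_flatten.2 ⟨targets, hmem, hx⟩

-- termination of the DFS while-loop: either an unvisited node is popped (first component
-- drops) or an already-visited one is (it pushes nothing visited, second component drops)
theorem pvDfsDec (d : PySem.Dict String (List String)) (visited : PySem.Set String)
    (current : String) (rest ns : List String)
    (h1 : ∀ x ∈ ns, x ∈ rest ∨ x ∈ pvAllTargets d)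
    (h2 : current ∈ visited →
          (ns.filter (fun x => PySem.Set.contains visited x)).length ≤
          (rest.filter (fun x => PySem.Set.contains visited x)).length) :
    Prod.Lex (· < ·) (· < ·)
      (((ns ++ pvAllTargets d).toFinset \ (PySem.Set.add visited current).toFinset).card,
       (ns.filter (fun x => PySem.Set.contains (PySem.Set.add visited current) x)).length)
      ((((current :: rest) ++ pvAllTargets d).toFinset \ visited.toFinset).card,
       ((current :: rest).filter (fun x => PySem.Set.contains visited x)).length) := by
  by_cases hc : current ∈ visited
  · rw [PySem.Set.add_of_mem hc]
    have hsub : ((ns ++ pvAllTargets d).toFinset \ visited.toFinset)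
        ⊆ (((current :: rest) ++ pvAllTargets d).toFinset \ visited.toFinset) := by
      intro x hx
      simp only [Finset.mem_sdiff, List.mem_toFinset, List.mem_append] at *
      refine ⟨?_, hx.2⟩
      rcases hx.1 with h | h
      · rcases h1 x h with h' | h'
        · exact Or.inl (List.mem_cons_of_mem _ h')
        · exact Or.inr h'
      · exact Or.inr h
    have hle := Finset.card_le_card hsub
    have hlt2 : (ns.filter (fun x => PySem.Set.contains visited x)).length <
        ((current :: rest).filter (fun x => PySem.Set.contains visited x)).length := by
      have : PySem.Set.contains visited current = true := (PySem.Set.contains_iff _ _).2 hc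
      rw [List.filter_cons, this]
      exact Nat.lt_succ_of_le (h2 hc)
    rcases lt_or_eq_of_le hle with h | h
    · exact Prod.Lex.left _ _ h
    · rw [h]; exact Prod.Lex.right _ hlt2
  · apply Prod.Lex.left
    have hmemA : current ∈ (((current :: rest) ++ pvAllTargets d).toFinset \ visited.toFinset) := by
      simp [hc]
    have hsub : ((ns ++ pvAllTargets d).toFinset \ (PySem.Set.add visited current).toFinset)
        ⊆ ((((current :: rest) ++ pvAllTargets d).toFinset \ visited.toFinset).erase current) := by
      intro x hx
      simp only [Finset.mem_sdiff, List.mem_toFinset, List.mem_append,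
        PySem.Set.mem_add, Finset.mem_erase] at *
      push Not at hx
      refine ⟨hx.2.2, ?_, hx.2.1⟩
      rcases hx.1 with h | h
      · rcases h1 x h with h' | h'
        · exact Or.inl (List.mem_cons_of_mem _ h')
        · exact Or.inr h'
      · exact Or.inr h
    calc ((ns ++ pvAllTargets d).toFinset \ (PySem.Set.add visited current).toFinset).card
        ≤ ((((current :: rest) ++ pvAllTargets d).toFinset \ visited.toFinset).erase current).card :=
          Finset.card_le_card hsub
      _ < _ := Finset.card_erase_lt_of_mem hmemA

-- the 'while stack:' loop of A
def dfsLoop (d : PySem.Dict String (List String)) (visited comp : PySem.Set String)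
    (stack : List String) : PySem.Set String × PySem.Set String :=
  match stack with
  | [] => (visited, comp)
  | current :: rest =>
    let visited' := PySem.Set.add visited current
    let comp' := PySem.Set.add comp current
    match hget : d.get? current with
    | some targets => dfsLoop d visited' comp' (pvPush visited' rest targets)
    | none => dfsLoop d visited' comp' rest
termination_by (((stack ++ pvAllTargets d).toFinset \ visited.toFinset).card,
                (stack.filter (fun x => PySem.Set.contains visited x)).length)
decreasing_by
  · apply pvDfsDec
    · intro x hx
      rcases pvPushMem _ _ _ _ hx with h | h
      · exact Or.inl h
      · exact Or.inr (pvTargetsSub d current targets hget x h)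
    · intro hc
      rw [show PySem.Set.add visited current = visited from PySem.Set.add_of_mem hc,
        pvPushFilter]
  · apply pvDfsDec
    · intro x hx; exact Or.inl hx
    · intro _; exact le_refl _

-- one iteration of A's 'for node in nodes:' loop
def pvStep (d : PySem.Dict String (List String)) (st : PySem.Set String × Int)
    (node : String) : PySem.Set String × Int :=
  if PySem.Set.contains st.1 node then st
  else
    let r := dfsLoop d st.1 PySem.Set.empty [node]
    if !(r.2.any (fun n => d.contains n)) &&
       !(d.values.any (fun targets => r.2.any (fun n => targets.contains n)))
    then (r.1, st.2 + 1) else (r.1, st.2)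

def findOrphanedSubgraphs (nodes : List String) (edges : List (String × List String)) : Int :=
  let d := PySem.Dict.ofList edges
  (nodes.foldl (pvStep d) (PySem.Set.empty, 0)).2

-- ===== PORT B =====
-- linked = set(edges); for targets in edges.values(): linked.update(targets)
def pvLinked (d : PySem.Dict String (List String)) : PySem.Set String :=
  d.values.foldl (fun s ts => PySem.Set.update s ts) (PySem.Set.ofList d.keys)

def findOrphanedSubgraphs_alt (nodes : List String) (edges : List (String × List String)) : Int :=
  let d := PySem.Dict.ofList edges
  let linked := pvLinked d
  ((PySem.Set.ofList (nodes.filter (fun n => !(PySem.Set.contains linked n)))).length : Int)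

-- ===== PRECONDITION & SPEC =====
def Spec_findOrphanedSubgraphs (nodes : List String) (edges : List (String × List String)) (out : Int) : Prop := out = findOrphanedSubgraphs_alt nodes edges
instance (nodes : List String) (edges : List (String × List String)) (out : Int) : Decidable (Spec_findOrphanedSubgraphs nodes edges out) := by unfold Spec_findOrphanedSubgraphs; infer_instance

-- ===== CLAIM (what is proved, stated in full; the proofs are below) =====
def Claim_equal_findOrphanedSubgraphs : Prop := ∀ (nodes : List String) (edges : List (String × List String)), Dom_findOrphanedSubgraphs nodes edges → Spec_findOrphanedSubgraphs nodes edges (findOrphanedSubgraphs nodes edges)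

-- ===== LEMMAS AND PROOFS =====

-- a node is an orphaned component by itself iff it is neither an edge source nor a target
def pvCand (d : PySem.Dict String (List String)) (n : String) : Prop :=
  d.contains n = false ∧ n ∉ pvAllTargets d

theorem pvMemFoldlUpdate (ls : List (List String)) :
    ∀ (s : PySem.Set String) (x : String),
      x ∈ ls.foldl (fun s ts => PySem.Set.update s ts) s ↔ x ∈ s ∨ ∃ ts ∈ ls, x ∈ ts := by
  induction ls with
  | nil => intro s x; simp
  | cons ts ls ih =>
    intro s x
    rw [List.foldl_cons, ih, PySem.Set.mem_update]
    constructor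
    · rintro ((h | h) | ⟨ts', hts', h⟩)
      · exact Or.inl h
      · exact Or.inr ⟨ts, List.mem_cons_self, h⟩
      · exact Or.inr ⟨ts', List.mem_cons_of_mem _ hts', h⟩
    · rintro (h | ⟨ts', hts', h⟩)
      · exact Or.inl (Or.inl h)
      · rcases List.mem_cons.1 hts' with rfl | h'
        · exact Or.inl (Or.inr h)
        · exact Or.inr ⟨ts', h', h⟩

theorem pvMemLinked (d : PySem.Dict String (List String)) (x : String) :
    x ∈ pvLinked d ↔ d.contains x = true ∨ x ∈ pvAllTargets d := by
  rw [pvLinked, pvMemFoldlUpdate]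
  rw [PySem.Set.mem_ofList, ← PySem.Dict.contains_iff_mem_keys]
  constructor
  · rintro (h | ⟨ts, hts, h⟩)
    · exact Or.inl h
    · exact Or.inr (List.mem_flatten.2 ⟨ts, hts, h⟩)
  · rintro (h | h)
    · exact Or.inl h
    · rcases List.mem_flatten.1 h with ⟨ts, hts, h⟩
      exact Or.inr ⟨ts, hts, h⟩

theorem pvCandIff (d : PySem.Dict String (List String)) (n : String) :
    (!(PySem.Set.contains (pvLinked d) n)) = true ↔ pvCand d n := by
  constructor
  · intro hp
    rw [Bool.not_eq_true'] at hp
    have hnot : ¬ (d.contains n = true ∨ n ∈ pvAllTargets d) := by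
      intro hmem
      rw [(PySem.Set.contains_iff _ _).2 ((pvMemLinked d n).2 hmem)] at hp
      cases hp
    refine ⟨?_, fun h' => hnot (Or.inr h')⟩
    cases hb : d.contains n with
    | false => rfl
    | true => exact absurd (Or.inl hb) hnot
  · rintro ⟨h1, h2⟩
    rw [Bool.not_eq_true']
    cases hb : PySem.Set.contains (pvLinked d) n with
    | false => rfl
    | true =>
      rcases (pvMemLinked d n).1 ((PySem.Set.contains_iff _ _).1 hb) with h | h
      · rw [h1] at h; cases h
      · exact absurd h h2

theorem dfsLoop_visited_mono (d : PySem.Dict String (List String))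
    (visited comp : PySem.Set String) (stack : List String) :
    ∀ x ∈ visited, x ∈ (dfsLoop d visited comp stack).1 := by
  induction visited, comp, stack using dfsLoop.induct d with
  | case1 visited comp => intro x hx; rw [dfsLoop]; exact hx
  | case2 visited comp current rest v' c' targets hget ih =>
    intro x hx
    rw [dfsLoop]
    split
    · rename_i t heq
      rw [hget] at heq
      injection heq with heq'
      subst heq'
      exact ih x ((PySem.Set.mem_add _ _ _).2 (Or.inl hx))
    · rename_i heq
      rw [hget] at heq
      cases heq
  | case3 visited comp current rest v' c' hget ih =>
    intro x hx
    rw [dfsLoop]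
    split
    · rename_i t heq
      rw [hget] at heq
      cases heq
    · exact ih x ((PySem.Set.mem_add _ _ _).2 (Or.inl hx))

theorem dfsLoop_visited_sub (d : PySem.Dict String (List String))
    (visited comp : PySem.Set String) (stack : List String) :
    ∀ x ∈ (dfsLoop d visited comp stack).1,
      x ∈ visited ∨ x ∈ stack ∨ x ∈ pvAllTargets d := by
  induction visited, comp, stack using dfsLoop.induct d with
  | case1 visited comp => intro x hx; rw [dfsLoop] at hx; exact Or.inl hx
  | case2 visited comp current rest v' c' targets hget ih =>
    intro x hx
    rw [dfsLoop] at hx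
    split at hx
    · rename_i t heq
      rw [hget] at heq
      injection heq with heq'
      subst heq'
      rcases ih x hx with h | h | h
      · rcases (PySem.Set.mem_add _ _ _).1 h with h' | h'
        · exact Or.inl h'
        · exact Or.inr (Or.inl (by simp [h']))
      · rcases pvPushMem _ _ _ _ h with h' | h'
        · exact Or.inr (Or.inl (List.mem_cons_of_mem _ h'))
        · exact Or.inr (Or.inr (pvTargetsSub d current targets hget x h'))
      · exact Or.inr (Or.inr h)
    · rename_i heq
      rw [hget] at heq
      cases heq
  | case3 visited comp current rest v' c' hget ih =>
    intro x hx
    rw [dfsLoop] at hx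
    split at hx
    · rename_i t heq
      rw [hget] at heq
      cases heq
    · rcases ih x hx with h | h | h
      · rcases (PySem.Set.mem_add _ _ _).1 h with h' | h'
        · exact Or.inl h'
        · exact Or.inr (Or.inl (by simp [h']))
      · exact Or.inr (Or.inl (List.mem_cons_of_mem _ h))
      · exact Or.inr (Or.inr h)

theorem dfsLoop_comp_mono (d : PySem.Dict String (List String))
    (visited comp : PySem.Set String) (stack : List String) :
    ∀ x ∈ comp, x ∈ (dfsLoop d visited comp stack).2 := by
  induction visited, comp, stack using dfsLoop.induct d with
  | case1 visited comp => intro x hx; rw [dfsLoop]; exact hx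
  | case2 visited comp current rest v' c' targets hget ih =>
    intro x hx
    rw [dfsLoop]
    split
    · rename_i t heq
      rw [hget] at heq
      injection heq with heq'
      subst heq'
      exact ih x ((PySem.Set.mem_add _ _ _).2 (Or.inl hx))
    · rename_i heq
      rw [hget] at heq
      cases heq
  | case3 visited comp current rest v' c' hget ih =>
    intro x hx
    rw [dfsLoop]
    split
    · rename_i t heq
      rw [hget] at heq
      cases heq
    · exact ih x ((PySem.Set.mem_add _ _ _).2 (Or.inl hx))

theorem dfsLoop_mem_comp_start (d : PySem.Dict String (List String))
    (visited comp : PySem.Set String) (n : String) :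
    n ∈ (dfsLoop d visited comp [n]).2 := by
  rw [dfsLoop]
  split
  · exact dfsLoop_comp_mono _ _ _ _ n ((PySem.Set.mem_add _ _ _).2 (Or.inr rfl))
  · exact dfsLoop_comp_mono _ _ _ _ n ((PySem.Set.mem_add _ _ _).2 (Or.inr rfl))

theorem dfsLoop_isolated (d : PySem.Dict String (List String)) (visited : PySem.Set String)
    (n : String) (hget : d.get? n = none) :
    dfsLoop d visited PySem.Set.empty [n]
      = (PySem.Set.add visited n, PySem.Set.add PySem.Set.empty n) := by
  rw [dfsLoop]
  split
  · rename_i t heq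
    rw [hget] at heq
    cases heq
  · rw [dfsLoop]

theorem pvMain (d : PySem.Dict String (List String)) (ns : List String) :
    ∀ (visited s : PySem.Set String) (count : Int),
      s.Nodup →
      (∀ n, pvCand d n → (n ∈ visited ↔ n ∈ s)) →
      (ns.foldl (pvStep d) (visited, count)).2
        = count
          + ((ns.foldl (fun s n =>
                if !(PySem.Set.contains (pvLinked d) n) then PySem.Set.add s n else s)
              s).length : Int)
          - (s.length : Int) := by
  induction ns with
  | nil =>
    intro visited s count _ _
    simp only [List.foldl_nil]
    omega
  | cons n ns ih =>
    intro visited s count hnd hR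
    rw [List.foldl_cons, List.foldl_cons]
    by_cases hv : PySem.Set.contains visited n = true
    · rw [show pvStep d (visited, count) n = (visited, count) from by
        simp only [pvStep, hv]; rfl]
      by_cases hp : (!(PySem.Set.contains (pvLinked d) n)) = true
      · have hc : pvCand d n := (pvCandIff d n).1 hp
        have hns : n ∈ s := (hR n hc).1 ((PySem.Set.contains_iff _ _).1 hv)
        rw [if_pos hp, PySem.Set.add_of_mem hns]
        exact ih visited s count hnd hR
      · rw [if_neg hp]
        exact ih visited s count hnd hR
    · have hvmem : n ∉ visited := fun hm => hv ((PySem.Set.contains_iff _ _).2 hm)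
      cases hget : d.get? n with
      | some ts =>
        have hk : d.contains n = true := by
          rw [PySem.Dict.contains_eq_isSome_get?, hget]; rfl
        have hany : ((dfsLoop d visited PySem.Set.empty [n]).2.any
            (fun m => d.contains m)) = true :=
          List.any_eq_true.2 ⟨n, dfsLoop_mem_comp_start d visited PySem.Set.empty n, hk⟩
        rw [show pvStep d (visited, count) n
            = ((dfsLoop d visited PySem.Set.empty [n]).1, count) from by
          simp only [pvStep]
          rw [if_neg hv, hany]
          simp only [Bool.not_true, Bool.false_and]
          rfl]
        have hR' : ∀ m, pvCand d m →
            (m ∈ (dfsLoop d visited PySem.Set.empty [n]).1 ↔ m ∈ s) := by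
          intro m hm
          rw [← hR m hm]
          constructor
          · intro hmem
            rcases dfsLoop_visited_sub d visited _ [n] m hmem with h | h | h
            · exact h
            · exfalso
              have hmn : m = n := by simpa using h
              rw [hmn] at hm
              rw [hm.1] at hk
              cases hk
            · exact absurd h hm.2
          · exact fun hmem => dfsLoop_visited_mono d visited _ [n] m hmem
        have hp : ¬ ((!(PySem.Set.contains (pvLinked d) n)) = true) := by
          intro hp
          have := ((pvCandIff d n).1 hp).1
          rw [hk] at this
          cases this
        rw [if_neg hp]
        exact ih _ s count hnd hR'
      | none =>
        have hk : d.contains n = false := by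
          rw [PySem.Dict.contains_eq_isSome_get?, hget]; rfl
        have hr : dfsLoop d visited PySem.Set.empty [n]
            = (PySem.Set.add visited n, PySem.Set.add PySem.Set.empty n) :=
          dfsLoop_isolated d visited n hget
        have hcomp : (PySem.Set.add PySem.Set.empty n : PySem.Set String) = [n] := rfl
        by_cases hT : n ∈ pvAllTargets d
        · have hany2 : (d.values.any
              (fun targets => ([n] : List String).any (fun m => targets.contains m))) = true := by
            rcases List.mem_flatten.1 hT with ⟨ts', hts', hmemts⟩
            exact List.any_eq_true.2 ⟨ts', hts', by simpa using hmemts⟩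
          rw [show pvStep d (visited, count) n = (PySem.Set.add visited n, count) from by
            simp only [pvStep]
            rw [if_neg hv, hr]
            simp only [hcomp]
            rw [hany2]
            simp only [Bool.not_true, Bool.and_false]
            rfl]
          have hp : ¬ ((!(PySem.Set.contains (pvLinked d) n)) = true) :=
            fun hp => absurd hT ((pvCandIff d n).1 hp).2
          rw [if_neg hp]
          have hR' : ∀ m, pvCand d m → (m ∈ PySem.Set.add visited n ↔ m ∈ s) := by
            intro m hm
            rw [← hR m hm, PySem.Set.mem_add]
            constructor
            · rintro (h | rfl)
              · exact h
              · exact absurd hT hm.2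
            · exact Or.inl
          exact ih _ s count hnd hR'
        · have hcand : pvCand d n := ⟨hk, hT⟩
          have hany2 : (d.values.any
              (fun targets => ([n] : List String).any (fun m => targets.contains m))) = false := by
            cases hb : (d.values.any
                (fun targets => ([n] : List String).any (fun m => targets.contains m))) with
            | false => rfl
            | true =>
              exfalso
              rcases List.any_eq_true.1 hb with ⟨ts', hts', hts2⟩
              refine hT (List.mem_flatten.2 ⟨ts', hts', ?_⟩)
              simpa using hts2
          rw [show pvStep d (visited, count) n = (PySem.Set.add visited n, count + 1) from by
            simp only [pvStep]
            rw [if_neg hv, hr]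
            simp only [hcomp]
            rw [hany2]
            simp only [List.any_cons, List.any_nil, Bool.or_false]
            rw [hk]
            simp only [Bool.not_false, Bool.and_true]
            rfl]
          have hp : (!(PySem.Set.contains (pvLinked d) n)) = true := (pvCandIff d n).2 hcand
          rw [if_pos hp]
          have hnotin : n ∉ s := fun hm => hvmem ((hR n hcand).2 hm)
          have hlen : (PySem.Set.add s n).length = s.length + 1 := by
            rw [PySem.Set.add_of_not_mem hnotin]
            simp
          have hnd' : (PySem.Set.add s n).Nodup := PySem.Set.nodup_add s n hnd
          have hR' : ∀ m, pvCand d m →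
              (m ∈ PySem.Set.add visited n ↔ m ∈ PySem.Set.add s n) := by
            intro m hm
            rw [PySem.Set.mem_add, PySem.Set.mem_add, hR m hm]
          rw [ih _ _ (count + 1) hnd' hR', hlen]
          push_cast
          ring

theorem pvFoldFilter (d : PySem.Dict String (List String)) (ns : List String) :
    ∀ s : PySem.Set String,
      ns.foldl (fun s n =>
          if !(PySem.Set.contains (pvLinked d) n) then PySem.Set.add s n else s) s
        = PySem.Set.update s (ns.filter (fun n => !(PySem.Set.contains (pvLinked d) n))) := by
  induction ns with
  | nil => intro s; simp [PySem.Set.update_nil]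
  | cons n ns ih =>
    intro s
    rw [List.foldl_cons, List.filter_cons]
    by_cases h : (!(PySem.Set.contains (pvLinked d) n)) = true
    · rw [if_pos h, if_pos h, ih, PySem.Set.update_cons]
    · rw [if_neg h, if_neg h, ih]

-- ===== VERDICT (by name: the statement is the Claim_ definition above) =====
theorem findOrphanedSubgraphs_spec : Claim_equal_findOrphanedSubgraphs := by
  unfold Claim_equal_findOrphanedSubgraphs
  intro nodes edges _
  unfold Spec_findOrphanedSubgraphs findOrphanedSubgraphs findOrphanedSubgraphs_alt
  simp only
  rw [pvMain _ _ PySem.Set.empty PySem.Set.empty 0 (by simp [PySem.Set.empty])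
    (by intro n _; rfl)]
  rw [pvFoldFilter, show (PySem.Set.empty : PySem.Set String) = [] from rfl,
    PySem.Set.update_nil_left]
  simp
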